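-- pv_equiv track=rewrite | github.com/DBurca/TimeframeCloseProbability | main.py | get_consecutive_streaks
-- ===== SOURCE A (Python) =====
-- def get_consecutive_streaks(closes):
--     """
--     Analyze consecutive up/down moves in closing prices.
--     Returns dictionaries with streak lengths and their frequencies.
--     """
--     up_streaks = []
--     down_streaks = []
--
--     current_up_streak = 0
--     current_down_streak = 0
--
--     for i in range(1, len(closes)):
--         if closes[i] > closes[i-1]:  # Up day
--             current_up_streak += 1
--             if current_down_streak > 0:
--                 down_streaks.append(current_down_streak)
--                 current_down_streak = 0
--         else:  # Down day (or equal)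
--             current_down_streak += 1
--             if current_up_streak > 0:
--                 up_streaks.append(current_up_streak)
--                 current_up_streak = 0
--
--     # Don't forget the last streak if it's still active
--     if current_up_streak > 0:
--         up_streaks.append(current_up_streak)
--     if current_down_streak > 0:
--         down_streaks.append(current_down_streak)
--
--     return up_streaks, down_streaks
-- ===== SOURCE B (Python) =====
-- from itertools import groupby
--
-- def get_consecutive_streaks(closes):
--     dirs = [closes[i] > closes[i - 1] for i in range(1, len(closes))]
--     up_streaks = []
--     down_streaks = []
--     for key, group in groupby(dirs):
--         length = sum(1 for _ in group)
--         (up_streaks if key else down_streaks).append(length)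
--     return up_streaks, down_streaks
-- ===== Notes on version B (the rewrite author's own statement) =====
-- stated objective: idiomatic
-- what changed: B materializes a per-day direction list and run-length-encodes it with itertools.groupby, replacing A's two interleaved incremental streak counters and manual final-streak flush.
import Mathlib
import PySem

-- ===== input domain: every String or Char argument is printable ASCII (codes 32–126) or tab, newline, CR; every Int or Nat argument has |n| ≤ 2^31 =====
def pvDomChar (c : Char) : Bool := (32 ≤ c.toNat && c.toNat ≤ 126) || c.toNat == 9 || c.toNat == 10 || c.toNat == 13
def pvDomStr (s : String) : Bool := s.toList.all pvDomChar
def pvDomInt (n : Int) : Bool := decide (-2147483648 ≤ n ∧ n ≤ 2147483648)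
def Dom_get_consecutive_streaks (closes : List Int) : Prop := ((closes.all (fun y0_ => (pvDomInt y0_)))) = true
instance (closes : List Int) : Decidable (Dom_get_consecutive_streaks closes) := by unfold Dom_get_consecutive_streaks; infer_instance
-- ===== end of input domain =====

-- ===== PORT A =====
-- B replaces A's interleaved incremental streak counters with a direction list + groupby run-length pass (idiomatic; same cost).
-- A-side helper: one loop iteration of A, branching on whether day i is an up day.
def pvStepA (st : List Int × List Int × Int × Int) (up : Bool) : List Int × List Int × Int × Int :=
  match st with
  | (ups, downs, cu, cd) =>
    if up then
      if cd > 0 then (ups, downs ++ [cd], cu + 1, 0) else (ups, downs, cu + 1, cd)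
    else
      if cu > 0 then (ups ++ [cu], downs, 0, cd + 1) else (ups, downs, cu, cd + 1)

def get_consecutive_streaks (closes : List Int) : List Int × List Int :=
  match (PySem.List.pyRange 1 (closes.length : Int) 1).foldl
      (fun st i => pvStepA st (decide (PySem.List.pyGetD closes i 0 > PySem.List.pyGetD closes (i - 1) 0)))
      ([], [], 0, 0) with
  | (ups, downs, cu, cd) =>
    (if cu > 0 then ups ++ [cu] else ups, if cd > 0 then downs ++ [cd] else downs)

-- ===== PORT B =====
-- B-side helper: itertools.groupby restricted to what Source B uses of it — (key, run length) pairs.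
def pvGroupGo (k : Bool) (cnt : Int) : List Bool → List (Bool × Int)
  | [] => [(k, cnt)]
  | b :: t => if b = k then pvGroupGo k (cnt + 1) t else (k, cnt) :: pvGroupGo b 1 t

def pvGroupLens : List Bool → List (Bool × Int)
  | [] => []
  | b :: t => pvGroupGo b 1 t

def get_consecutive_streaks_alt (closes : List Int) : List Int × List Int :=
  (pvGroupLens ((PySem.List.pyRange 1 (closes.length : Int) 1).map
      (fun i => decide (PySem.List.pyGetD closes i 0 > PySem.List.pyGetD closes (i - 1) 0)))).foldl
    (fun acc p => if p.1 then (acc.1 ++ [p.2], acc.2) else (acc.1, acc.2 ++ [p.2]))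
    ([], [])

-- ===== PRECONDITION & SPEC =====
def Spec_get_consecutive_streaks (closes : List Int) (out : List Int × List Int) : Prop := out = get_consecutive_streaks_alt closes
instance (closes : List Int) (out : List Int × List Int) : Decidable (Spec_get_consecutive_streaks closes out) := by unfold Spec_get_consecutive_streaks; infer_instance

-- ===== CLAIM (what is proved, stated in full; the proofs are below) =====
def Claim_equal_get_consecutive_streaks : Prop := ∀ (closes : List Int), Dom_get_consecutive_streaks closes → Spec_get_consecutive_streaks closes (get_consecutive_streaks closes)

-- ===== LEMMAS AND PROOFS =====

-- Invariant: running A's loop from a state holding one open streak of direction k and length n (> 0),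
-- then flushing the open streak, equals B's append-fold over the groupby of the remaining directions.
theorem pv_main (t : List Bool) : ∀ (k : Bool) (n : Int) (ups downs : List Int), 0 < n →
    (match t.foldl pvStepA (ups, downs, (if k then n else 0), (if k then 0 else n)) with
     | (u, d, cu, cd) => (if cu > 0 then u ++ [cu] else u, if cd > 0 then d ++ [cd] else d))
    = (pvGroupGo k n t).foldl
        (fun acc p => if p.1 then (acc.1 ++ [p.2], acc.2) else (acc.1, acc.2 ++ [p.2]))
        (ups, downs) := by
  induction t with
  | nil =>
    intro k n ups downs hn
    cases k <;> simp [pvGroupGo, hn]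
  | cons b t ih =>
    intro k n ups downs hn
    cases k with
    | true =>
      cases b with
      | true =>
        have h1 : (true :: t).foldl pvStepA (ups, downs, (if true then n else 0), (if true then 0 else n))
            = t.foldl pvStepA (ups, downs, (if true then n + 1 else 0), (if true then 0 else n + 1)) := by
          simp [pvStepA]
        rw [h1, ih true (n + 1) ups downs (by omega)]
        simp [pvGroupGo]
      | false =>
        have h1 : (false :: t).foldl pvStepA (ups, downs, (if true then n else 0), (if true then 0 else n))
            = t.foldl pvStepA (ups ++ [n], downs, (if false then 1 else 0), (if false then 0 else 1)) := by
          simp [pvStepA, hn]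
        rw [h1, ih false 1 (ups ++ [n]) downs (by omega)]
        simp [pvGroupGo]
    | false =>
      cases b with
      | false =>
        have h1 : (false :: t).foldl pvStepA (ups, downs, (if false then n else 0), (if false then 0 else n))
            = t.foldl pvStepA (ups, downs, (if false then n + 1 else 0), (if false then 0 else n + 1)) := by
          simp [pvStepA]
        rw [h1, ih false (n + 1) ups downs (by omega)]
        simp [pvGroupGo]
      | true =>
        have h1 : (true :: t).foldl pvStepA (ups, downs, (if false then n else 0), (if false then 0 else n))
            = t.foldl pvStepA (ups, downs ++ [n], (if true then 1 else 0), (if true then 0 else 1)) := by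
          simp [pvStepA, hn]
        rw [h1, ih true 1 ups (downs ++ [n]) (by omega)]
        simp [pvGroupGo]

theorem pv_dirs (dirs : List Bool) :
    (match dirs.foldl pvStepA ([], [], 0, 0) with
     | (u, d, cu, cd) => (if cu > 0 then u ++ [cu] else u, if cd > 0 then d ++ [cd] else d))
    = (pvGroupLens dirs).foldl
        (fun acc p => if p.1 then (acc.1 ++ [p.2], acc.2) else (acc.1, acc.2 ++ [p.2]))
        ([], []) := by
  cases dirs with
  | nil => simp [pvGroupLens]
  | cons b t =>
    cases b with
    | true =>
      have h1 : (true :: t).foldl pvStepA ([], [], 0, 0)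
          = t.foldl pvStepA ([], [], (if true then (1 : Int) else 0), (if true then 0 else 1)) := by
        simp [pvStepA]
      rw [h1, pv_main t true 1 [] [] (by omega)]
      simp [pvGroupLens]
    | false =>
      have h1 : (false :: t).foldl pvStepA ([], [], 0, 0)
          = t.foldl pvStepA ([], [], (if false then (1 : Int) else 0), (if false then 0 else 1)) := by
        simp [pvStepA]
      rw [h1, pv_main t false 1 [] [] (by omega)]
      simp [pvGroupLens]

-- ===== VERDICT (by name: the statement is the Claim_ definition above) =====
theorem get_consecutive_streaks_spec : Claim_equal_get_consecutive_streaks := by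
  intro closes _
  unfold Spec_get_consecutive_streaks get_consecutive_streaks get_consecutive_streaks_alt
  rw [← List.foldl_map]
  exact pv_dirs _
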